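-- pv_equiv track=rewrite | github.com/jacktrusler/advent_of_coders | phil/2023/day14.py | solve
-- ===== SOURCE A (Python) =====
-- def tilt_left(items: str) -> str:
--     new_items = ''
--     rocks = ''
--     blanks = ''
--     for char in items:
--         match char:
--             case 'O':
--                 rocks += 'O'
--             case '.':
--                 blanks += '.'
--             case '#':
--                 new_items += rocks + blanks + '#'
--                 rocks = ''
--                 blanks = ''
--     new_items += rocks + blanks
--     return new_items
--
-- def transpose(x: tuple) -> tuple:
--     return tuple(map(''.join, zip(*x)))
--
-- def north(grid: tuple) -> tuple:
--     return transpose(west(transpose(grid)))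
--
-- def south(grid: tuple) -> tuple:
--     return transpose(east(transpose(grid)))
--
-- def east(grid: tuple) -> tuple:
--     return tuple(tilt_left(row[::-1])[::-1] for row in grid)
--
-- def west(grid: tuple) -> tuple:
--     return tuple(tilt_left(row) for row in grid)
--
-- def score(grid: tuple) -> int:
--     return sum([(len(grid) - i) * row.count('O') for i, row in enumerate(grid)])
--
-- def i_matching(n: int, a: int, b: int) -> int:
--     """Return an index in range [a, b] of a value in a cyclical iterable at n if the items at a and b are equal"""
--     return ((n - b) % (a - b)) + b
--
-- def cycle_grids(grid: tuple):
--     i = 0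
--     yield i, grid
--     while True:
--         i += 1
--         grid = east(south(west(north(grid))))
--         yield i, grid
--
-- def solve(raw_input: str) -> tuple[int, int]:
--     grids = dict()
--     for i, grid in cycle_grids(tuple(raw_input.splitlines())):
--         try:
--             i_match = grids[grid]
--         except KeyError:
--             grids[grid] = i
--         else:
--             break
--     grid_lookup = {v: k for k, v in grids.items()}
--     a = score(north(grid_lookup[0]))
--     b = score(grid_lookup[i_matching(1000000000, i, i_match)])
--     return a, b
-- ===== SOURCE B (Python) =====
-- def _tilt_row(row: str) -> str:
--     # rocks roll left within each '#'-delimited segment; other chars are discarded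
--     return '#'.join('O' * seg.count('O') + '.' * seg.count('.')
--                     for seg in row.split('#'))
--
-- def _transpose(grid: tuple) -> tuple:
--     return tuple(map(''.join, zip(*grid)))
--
-- def _spin(grid: tuple) -> tuple:
--     # north, west, south, east = (transpose then tilt-left) twice,
--     # then (transpose then tilt-right) twice
--     for k in range(4):
--         grid = _transpose(grid)
--         if k < 2:
--             grid = tuple(_tilt_row(r) for r in grid)
--         else:
--             grid = tuple(_tilt_row(r[::-1])[::-1] for r in grid)
--     return grid
--
-- def _score(grid: tuple) -> int:
--     return sum((i + 1) * row.count('O')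
--                for i, row in enumerate(reversed(grid)))
--
-- def solve(raw_input: str) -> tuple[int, int]:
--     g = tuple(raw_input.splitlines())
--     seen = []
--     while g not in seen:
--         seen.append(g)
--         g = _spin(g)
--     mu = seen.index(g)
--     lam = len(seen) - mu
--     target = mu + (1000000000 - mu) % lam
--     north0 = _transpose(tuple(_tilt_row(r) for r in _transpose(seen[0])))
--     a = _score(north0)
--     b = _score(seen[target])
--     return a, b
-- ===== Notes on version B (the rewrite author's own statement) =====
-- stated objective: simpler
-- what changed: B rebuilds each tilted row by splitting on '#' and counting rocks/dots per segment instead of A's character-by-character string accumulation, replaces the generator + dict-of-seen-grids + reverse-lookup-dict cycle bookkeeping with a plain ordered list of seen grids indexed directly, fuses the four directional tilts into one transpose-and-tilt loop, and scores rows bottom-up instead of by len(grid)-i weights.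
import Mathlib
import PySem

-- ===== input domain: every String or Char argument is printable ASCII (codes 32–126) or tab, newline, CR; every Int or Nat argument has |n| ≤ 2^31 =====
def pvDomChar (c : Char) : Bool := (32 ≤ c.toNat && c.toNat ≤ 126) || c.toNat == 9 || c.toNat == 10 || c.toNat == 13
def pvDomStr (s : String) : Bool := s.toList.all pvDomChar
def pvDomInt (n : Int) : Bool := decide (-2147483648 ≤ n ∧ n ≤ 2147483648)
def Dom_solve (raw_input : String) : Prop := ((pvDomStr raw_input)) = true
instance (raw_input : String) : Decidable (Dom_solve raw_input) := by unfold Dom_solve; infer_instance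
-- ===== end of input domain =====

-- B replaces A's char-by-char accumulating tilt with a split-count-rebuild tilt, the
-- generator + dict + reverse-dict cycle bookkeeping with a plain list of seen grids,
-- fuses the four tilts into one loop and scores rows bottom-up: simpler, same results.
-- (Both ports share the transposition helper, which is identical in Source A and Source B,
-- and a fuel bound that makes the cycle-detection loop total in Lean: the fuel
-- exceeds the number of distinct grids the spin sequence can visit, so in Python
-- terms it is never exhausted; on exhaustion both ports return (0, 0).)

-- Grids are tuples of strings in Python; rows are represented as their code-point
-- lists (List Char), the representation PySem.Chars itself uses.

-- zip(*g): exact hand port of Python's zip over the unpacked rows — it stops at the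
-- shortest row, and zip() of no arguments is empty.  ''.join of a tuple of single
-- characters is the corresponding row, which under the List Char representation is
-- the produced column itself, so transpose IS this zip.
def pyTranspose (g : List (List Char)) : List (List Char) :=
  match g with
  | [] => []
  | r :: rs =>
    if h : (r :: rs).any List.isEmpty then []
    else ((r :: rs).map (fun l => l.headD ' ')) :: pyTranspose ((r :: rs).map List.tail)
termination_by (g.headD []).length
decreasing_by
  have hr : r ≠ [] := fun hnil => h (by simp [hnil])
  simp only [List.map_cons, List.headD_cons]
  cases r with
  | nil => exact absurd rfl hr
  | cons a t => simp only [List.tail_cons, List.length_cons]; omega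

-- fuel bound shared by both ports (a totality guard only; see header comment)
def pvFuel (g : List (List Char)) : Nat :=
  3 ^ ((g.length + (g.map List.length).foldl Nat.max 0 + 1) ^ 2) + 4

-- ===== PORT A =====

-- tilt_left: fold over the characters with the (new_items, rocks, blanks) strings;
-- a character matching no case (no default case) is dropped, as in Python.
def tiltLeftA (items : List Char) : List Char :=
  let st := items.foldl
    (fun (acc : List Char × List Char × List Char) c =>
      if c = 'O' then (acc.1, acc.2.1 ++ ['O'], acc.2.2)
      else if c = '.' then (acc.1, acc.2.1, acc.2.2 ++ ['.'])
      else if c = '#' then (acc.1 ++ acc.2.1 ++ acc.2.2 ++ ['#'], [], [])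
      else acc)
    ([], [], [])
  st.1 ++ st.2.1 ++ st.2.2

def westA (g : List (List Char)) : List (List Char) := g.map tiltLeftA

-- row[::-1] is List.reverse (PySem.List.slice?_none_none_neg_one)
def eastA (g : List (List Char)) : List (List Char) :=
  g.map (fun r => (tiltLeftA r.reverse).reverse)

def northA (g : List (List Char)) : List (List Char) := pyTranspose (westA (pyTranspose g))

def southA (g : List (List Char)) : List (List Char) := pyTranspose (eastA (pyTranspose g))

def scoreA (g : List (List Char)) : Int :=
  ((PySem.List.enumerate g 0).map
    (fun p => (PySem.List.len g - p.1) * (PySem.Chars.count p.2 ['O'] : Int))).sum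

def iMatchingA (n a b : Int) : Int := PySem.Int.mod (n - b) (a - b) + b

-- body of cycle_grids: east(south(west(north(grid))))
def spinA (g : List (List Char)) : List (List Char) := eastA (southA (westA (northA g)))

-- the solve loop: look the grid up in the dict (KeyError = not yet seen → store it
-- and spin), break with (i, i_match) on a hit
def loopA (fuel : Nat) (d : PySem.Dict (List (List Char)) Int) (i : Int)
    (g : List (List Char)) :
    Option (PySem.Dict (List (List Char)) Int × Int × Int) :=
  match fuel with
  | 0 => none
  | f + 1 =>
    match d.get? g with
    | some m => some (d, i, m)
    | none => loopA f (d.insert g i) (i + 1) (spinA g)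

def solve (raw_input : String) : Int × Int :=
  let g0 := (PySem.Str.splitlines raw_input).map String.toList
  match loopA (pvFuel g0) PySem.Dict.empty 0 g0 with
  | none => (0, 0)  -- fuel guard only (never reached in Python)
  | some (d, i, m) =>
    -- grid_lookup = {v: k for k, v in grids.items()}
    let rev : PySem.Dict Int (List (List Char)) :=
      d.items.foldl (fun acc p => acc.insert p.2 p.1) PySem.Dict.empty
    -- .getD []: a KeyError is impossible here — 0 and the target index are always keys
    (scoreA (northA ((rev.get? 0).getD [])),
     scoreA ((rev.get? (iMatchingA 1000000000 i m)).getD []))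

-- ===== PORT B =====

-- '#'.join('O' * seg.count('O') + '.' * seg.count('.') for seg in row.split('#'))
def tiltRowB (row : List Char) : List Char :=
  PySem.Chars.join ['#']
    ((PySem.Chars.splitOn row ['#']).map
      (fun seg => List.replicate (PySem.Chars.count seg ['O']) 'O'
                  ++ List.replicate (PySem.Chars.count seg ['.']) '.'))

-- _spin: for k in range(4): transpose, then tilt rows left (k < 2) or right (k >= 2)
def spinB (g : List (List Char)) : List (List Char) :=
  (PySem.List.pyRange 0 4 1).foldl
    (fun g k =>
      let t := pyTranspose g
      if k < 2 then t.map tiltRowB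
      else t.map (fun r => (tiltRowB r.reverse).reverse))  -- r[::-1] is reverse
    g

-- sum((i + 1) * row.count('O') for i, row in enumerate(reversed(grid)))
def scoreB (g : List (List Char)) : Int :=
  ((PySem.List.enumerate g.reverse 0).map
    (fun p => (p.1 + 1) * (PySem.Chars.count p.2 ['O'] : Int))).sum

-- while g not in seen: seen.append(g); g = _spin(g)
def loopB (fuel : Nat) (seen : List (List (List Char))) (g : List (List Char)) :
    Option (List (List (List Char)) × List (List Char)) :=
  match fuel with
  | 0 => none
  | f + 1 =>
    if seen.contains g then some (seen, g)
    else loopB f (seen ++ [g]) (spinB g)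

def solve_alt (raw_input : String) : Int × Int :=
  let g0 := (PySem.Str.splitlines raw_input).map String.toList
  match loopB (pvFuel g0) [] g0 with
  | none => (0, 0)  -- fuel guard only (never reached in Python)
  | some (seen, g) =>
    -- seen.index(g): a ValueError is impossible (the loop stopped on g ∈ seen)
    let mu : Int := ((PySem.List.index? seen g).getD 0 : Nat)
    let lam : Int := PySem.List.len seen - mu
    let target : Int := mu + PySem.Int.mod (1000000000 - mu) lam
    -- seen[0] and seen[target]: an IndexError is impossible (mu ≤ target < len(seen))
    let north0 := pyTranspose ((pyTranspose (PySem.List.pyGetD seen 0 [])).map tiltRowB)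
    (scoreB north0, scoreB (PySem.List.pyGetD seen target []))

-- ===== PRECONDITION & SPEC =====
def Spec_solve (raw_input : String) (out : Int × Int) : Prop := out = solve_alt raw_input
instance (raw_input : String) (out : Int × Int) : Decidable (Spec_solve raw_input out) := by unfold Spec_solve; infer_instance

-- ===== CLAIM (what is proved, stated in full; the proofs are below) =====
def Claim_equal_solve : Prop := ∀ (raw_input : String), Dom_solve raw_input → Spec_solve raw_input (solve raw_input)

-- ===== LEMMAS AND PROOFS =====

-- characterization of A's fold
def tStep (acc : List Char × List Char × List Char) (c : Char) :
    List Char × List Char × List Char :=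
  if c = 'O' then (acc.1, acc.2.1 ++ ['O'], acc.2.2)
  else if c = '.' then (acc.1, acc.2.1, acc.2.2 ++ ['.'])
  else if c = '#' then (acc.1 ++ acc.2.1 ++ acc.2.2 ++ ['#'], [], [])
  else acc

def tCore : List Char → List Char → List Char → List Char
  | r, b, [] => r ++ b
  | r, b, c :: rest =>
    if c = 'O' then tCore (r ++ ['O']) b rest
    else if c = '.' then tCore r (b ++ ['.']) rest
    else if c = '#' then r ++ b ++ '#' :: tCore [] [] rest
    else tCore r b rest

theorem tiltA_foldl : ∀ (l : List Char) (new r b : List Char),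
    (l.foldl tStep (new, r, b)).1 ++ (l.foldl tStep (new, r, b)).2.1
      ++ (l.foldl tStep (new, r, b)).2.2 = new ++ tCore r b l := by
  intro l
  induction l with
  | nil => intro new r b; simp [tCore]
  | cons c rest ih =>
    intro new r b
    simp only [List.foldl_cons]
    by_cases hO : c = 'O' <;> by_cases hD : c = '.' <;> by_cases hH : c = '#' <;>
      simp [tStep, tCore, hO, hD, hH, ih]

theorem tiltLeftA_eq_tCore (l : List Char) : tiltLeftA l = tCore [] [] l := by
  have h := tiltA_foldl l [] [] []
  simp only [List.nil_append] at h
  show (l.foldl tStep ([], [], [])).1 ++ (l.foldl tStep ([], [], [])).2.1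
      ++ (l.foldl tStep ([], [], [])).2.2 = tCore [] [] l
  exact h
-- characterization of row.split('#') and seg.count(c) on single-character arguments
def sSplit : List Char → List Char → List (List Char)
  | cur, [] => [cur.reverse]
  | cur, c :: rest => if c = '#' then cur.reverse :: sSplit [] rest else sSplit (c :: cur) rest

theorem splitOn_go_char : ∀ (l : List Char) (fuel : Nat) (cur : List Char)
    (acc : List (List Char)), l.length < fuel →
    PySem.Chars.splitOn.go ['#'] fuel l cur acc = acc.reverse ++ sSplit cur l := by
  intro l
  induction l with
  | nil =>
    intro fuel cur acc h
    match fuel, h with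
    | f + 1, _ => simp [PySem.Chars.splitOn.go, sSplit]
  | cons c rest ih =>
    intro fuel cur acc h
    match fuel, h with
    | f + 1, h =>
      rw [PySem.Chars.splitOn.go]
      by_cases hc : c = '#'
      · subst hc
        rw [if_pos (by simp [List.isPrefixOf])]
        simp only [List.length_cons, List.length_nil, List.drop_succ_cons, List.drop_zero]
        rw [ih f [] (cur.reverse :: acc) (by simpa using h)]
        simp [sSplit]
      · rw [if_neg (by simp [List.isPrefixOf]; exact fun h' => absurd h'.symm hc)]
        rw [ih f (c :: cur) acc (by simpa using h)]
        simp [sSplit, hc]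

theorem splitOn_char (l : List Char) :
    PySem.Chars.splitOn l ['#'] = sSplit [] l := by
  rw [PySem.Chars.splitOn, splitOn_go_char l (l.length + 1) [] [] (by omega)]
  simp

theorem count_go_char : ∀ (l : List Char) (ch : Char) (fuel : Nat) (acc : Nat),
    l.length ≤ fuel →
    PySem.Chars.count.go [ch] fuel l acc = acc + l.count ch := by
  intro l
  induction l with
  | nil => intro ch fuel acc h; cases fuel <;> simp [PySem.Chars.count.go]
  | cons c rest ih =>
    intro ch fuel acc h
    match fuel, h with
    | f + 1, h =>
      rw [PySem.Chars.count.go]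
      by_cases hc : ch = c
      · subst hc
        rw [if_pos (by simp [List.isPrefixOf])]
        simp only [List.length_cons, List.length_nil, List.drop_succ_cons, List.drop_zero]
        rw [ih ch f (acc + 1) (by simpa using h)]
        rw [List.count_cons]
        simp
        omega
      · rw [if_neg (by simp [List.isPrefixOf, hc])]
        rw [ih ch f acc (by simpa using h)]
        rw [List.count_cons]
        simp [Ne.symm hc]

theorem count_char (l : List Char) (ch : Char) :
    PySem.Chars.count l [ch] = l.count ch := by
  rw [PySem.Chars.count]
  simp only [List.isEmpty, Bool.false_eq_true, if_false]
  simpa using count_go_char l ch l.length 0 (le_refl _)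
-- the segment rebuild of B
def fSeg (seg : List Char) : List Char :=
  List.replicate (seg.count 'O') 'O' ++ List.replicate (seg.count '.') '.'

theorem sSplit_ne_nil : ∀ cur l, sSplit cur l ≠ [] := by
  intro cur l
  induction l generalizing cur with
  | nil => simp [sSplit]
  | cons c rest ih =>
    by_cases hc : c = '#' <;> simp [sSplit, hc] <;> exact ih _

theorem tCore_join : ∀ (l cur : List Char),
    tCore (List.replicate (cur.count 'O') 'O') (List.replicate (cur.count '.') '.') l
      = PySem.Chars.join ['#'] ((sSplit cur l).map fSeg) := by
  intro l
  induction l with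
  | nil =>
    intro cur
    simp [sSplit, tCore, fSeg, List.count_reverse, PySem.Chars.join_singleton]
  | cons c rest ih =>
    intro cur
    by_cases hO : c = 'O'
    · subst hO
      rw [tCore, if_pos rfl]
      have h1 : List.replicate (cur.count 'O') 'O' ++ ['O']
          = List.replicate (('O' :: cur).count 'O') 'O' := by
        simp [List.replicate_succ']
      have h2 : List.replicate (cur.count '.') '.'
          = List.replicate (('O' :: cur).count '.') '.' := by
        simp
      rw [h1, h2, ih ('O' :: cur)]
      simp [sSplit]
    · by_cases hD : c = '.'
      · subst hD
        rw [tCore, if_neg (by simp [hO]), if_pos rfl]  -- hmm c fixed '.' ≠ 'O'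
        have h1 : List.replicate (cur.count 'O') 'O'
            = List.replicate (('.' :: cur).count 'O') 'O' := by
          simp
        have h2 : List.replicate (cur.count '.') '.' ++ ['.']
            = List.replicate (('.' :: cur).count '.') '.' := by
          simp [List.replicate_succ']
        rw [h1, h2, ih ('.' :: cur)]
        simp [sSplit]
      · by_cases hH : c = '#'
        · subst hH
          rw [tCore, if_neg (by simp), if_neg (by simp), if_pos rfl]
          have ih0 := ih []
          simp only [List.count_nil, List.replicate_zero] at ih0
          rw [ih0]
          rw [show sSplit cur ('#' :: rest) = cur.reverse :: sSplit [] rest by simp [sSplit]]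
          obtain ⟨m, ms, hms⟩ : ∃ m ms, sSplit [] rest = m :: ms := by
            cases hs : sSplit [] rest with
            | nil => exact absurd hs (sSplit_ne_nil [] rest)
            | cons m ms => exact ⟨m, ms, rfl⟩
          rw [hms]
          simp only [List.map_cons, PySem.Chars.join_cons_cons]
          simp [fSeg, List.count_reverse]
        · rw [tCore, if_neg hO, if_neg hD, if_neg hH]
          have h1 : List.replicate (cur.count 'O') 'O'
              = List.replicate ((c :: cur).count 'O') 'O' := by
            simp [hO]
          have h2 : List.replicate (cur.count '.') '.'
              = List.replicate ((c :: cur).count '.') '.' := by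
            simp [hD]
          rw [h1, h2, ih (c :: cur)]
          simp [sSplit, hH]

theorem tilt_eq : ∀ row, tiltRowB row = tiltLeftA row := by
  intro row
  rw [tiltRowB, tiltLeftA_eq_tCore, splitOn_char]
  have hmap : ∀ (xs : List (List Char)),
      xs.map (fun seg => List.replicate (PySem.Chars.count seg ['O']) 'O'
        ++ List.replicate (PySem.Chars.count seg ['.']) '.') = xs.map fSeg := by
    intro xs
    apply List.map_congr_left
    intro seg _
    simp [fSeg, count_char]
  rw [hmap]
  have := tCore_join row []
  simpa using this.symm
theorem score_gen (c : List Char → Int) : ∀ (g : List (List Char))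
    (s L : Int),
    ((PySem.List.enumerate g s).map (fun p => (L - p.1) * c p.2)).sum
      = ((PySem.List.enumerate g.reverse (L - s - g.length)).map
          (fun p => (p.1 + 1) * c p.2)).sum := by
  intro g
  induction g with
  | nil => intro s L; simp [PySem.List.enumerate_nil]
  | cons x g ih =>
    intro s L
    rw [PySem.List.enumerate_cons]
    simp only [List.map_cons, List.sum_cons, List.reverse_cons]
    rw [PySem.List.enumerate_append, ih (s + 1) L]
    rw [PySem.List.enumerate_cons, PySem.List.enumerate_nil]
    simp only [List.map_append, List.sum_append, List.map_cons, List.map_nil,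
      List.sum_cons, List.sum_nil, List.length_cons, List.length_reverse]
    push_cast
    rw [show L - (s + 1) - (g.length : Int) = L - s - ((g.length : Int) + 1) from by ring]
    ring

theorem score_eq : ∀ g, scoreB g = scoreA g := by
  intro g
  rw [scoreA, scoreB]
  have h := score_gen (fun r => (PySem.Chars.count r ['O'] : Int)) g 0 (PySem.List.len g)
  rw [h]
  simp [PySem.List.len_eq]

theorem spin_eq : ∀ g, spinB g = spinA g := by
  intro g
  have hr : PySem.List.pyRange 0 4 1 = [0, 1, 2, 3] := by decide
  rw [spinB, hr]
  simp only [List.foldl_cons, List.foldl_nil]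
  norm_num
  rw [spinA, northA, southA, westA, eastA, westA, eastA]
  rw [show tiltRowB = tiltLeftA from funext tilt_eq]
-- the dict A maintains is the list B maintains, paired with positions
def pairsOf : List (List (List Char)) → Nat → List (List (List Char) × Int)
  | [], _ => []
  | x :: xs, n => (x, (n : Int)) :: pairsOf xs (n + 1)

theorem pairsOf_append : ∀ (xs : List (List (List Char))) (n : Nat) (y),
    pairsOf (xs ++ [y]) n = pairsOf xs n ++ [(y, ((n + xs.length : Nat) : Int))] := by
  intro xs
  induction xs with
  | nil => intro n y; simp [pairsOf]
  | cons x xs ih =>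
    intro n y
    simp only [List.cons_append, pairsOf, ih (n + 1) y, List.length_cons]
    have hn : n + 1 + xs.length = n + (xs.length + 1) := by omega
    rw [hn]

theorem find_pairs : ∀ (seen : List (List (List Char))) (n : Nat) (g),
    List.find? (fun p => p.1 == g) (pairsOf seen n)
      = (PySem.List.index? seen g).map (fun k => (g, ((n + k : Nat) : Int))) := by
  intro seen
  induction seen with
  | nil => intro n g; simp [pairsOf, PySem.List.index?_eq_idxOf?]
  | cons x xs ih =>
    intro n g
    by_cases hx : x = g
    · subst hx
      rw [PySem.List.index?_cons_self]
      simp [pairsOf]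
    · rw [PySem.List.index?_cons_of_ne _ hx]
      simp only [pairsOf, List.find?_cons]
      rw [show ((x, (n : Int)).1 == g) = false from by simpa using hx]
      rw [ih (n + 1) g]
      cases PySem.List.index? xs g with
      | none => simp
      | some k =>
        simp only [Option.map_some]
        congr 2
        omega

theorem get?_pairs (d : PySem.Dict (List (List Char)) Int)
    (seen : List (List (List Char))) (g : List (List Char))
    (h : d.items = pairsOf seen 0) :
    d.get? g = (PySem.List.index? seen g).map (fun k => ((k : Nat) : Int)) := by
  rw [PySem.Dict.get?, h, find_pairs seen 0 g]
  cases PySem.List.index? seen g <;> simp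

theorem lockstep : ∀ (fuel : Nat) (seen : List (List (List Char)))
    (g : List (List Char)) (d : PySem.Dict (List (List Char)) Int),
    d.items = pairsOf seen 0 →
    loopA fuel d (seen.length : Int) g
      = (loopB fuel seen g).map
          (fun p => (PySem.Dict.mk (pairsOf p.1 0), ((p.1.length : Nat) : Int),
            (((PySem.List.index? p.1 p.2).getD 0 : Nat) : Int))) := by
  intro fuel
  induction fuel with
  | zero => intro seen g d h; rfl
  | succ f ih =>
    intro seen g d h
    rw [loopA, loopB]
    have hget := get?_pairs d seen g h
    by_cases hmem : g ∈ seen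
    · obtain ⟨k, hk⟩ : ∃ k, PySem.List.index? seen g = some k := by
        cases hidx : PySem.List.index? seen g with
        | none => exact absurd hmem ((PySem.List.index?_eq_none_iff seen g).mp hidx)
        | some k => exact ⟨k, rfl⟩
      have hcon : seen.contains g = true := by simpa using hmem
      rw [hget, hk, hcon]
      simp only [Option.map_some, if_true]
      have hd : d = PySem.Dict.mk (pairsOf seen 0) := by
        cases d; simpa using h
      rw [hd, hk]
      rfl
    · have hidx : PySem.List.index? seen g = none :=
        (PySem.List.index?_eq_none_iff seen g).mpr hmem
      have hcon : seen.contains g = false := by simpa using hmem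
      rw [hget, hidx, hcon]
      simp only [Option.map_none, Bool.false_eq_true, if_false]
      have hnc : d.contains g = false := by
        rw [PySem.Dict.contains_eq_isSome_get?, hget, hidx]
        rfl
      have hitems : (d.insert g (seen.length : Int)).items = pairsOf (seen ++ [g]) 0 := by
        rw [PySem.Dict.items_insert_of_not_contains d _ hnc, h, pairsOf_append]
        congr 3
        omega
      have := ih (seen ++ [g]) (spinB g) (d.insert g (seen.length : Int)) hitems
      rw [show (seen.length : Int) + 1 = (((seen ++ [g]).length : Nat) : Int) from by
        simp]
      rw [← spin_eq g]
      exact this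

theorem loopB_shape : ∀ (fuel : Nat) (seen : List (List (List Char)))
    (g : List (List Char)) (s' : List (List (List Char))) (gf : List (List Char)),
    loopB fuel seen g = some (s', gf) → gf ∈ s' ∧ ∃ t, s' = seen ++ t := by
  intro fuel
  induction fuel with
  | zero => intro seen g s' gf h; exact absurd h (by simp [loopB])
  | succ f ih =>
    intro seen g s' gf h
    rw [loopB] at h
    by_cases hc : seen.contains g = true
    · rw [if_pos hc] at h
      obtain ⟨h1, h2⟩ := Prod.mk.injEq .. ▸ Option.some.inj h
      subst h1; subst h2
      exact ⟨by simpa using hc, [], by simp⟩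
    · rw [if_neg hc] at h
      obtain ⟨hmem, t, ht⟩ := ih _ _ _ _ h
      exact ⟨hmem, [g] ++ t, by simpa using ht⟩
theorem snd_pairsOf : ∀ (s : List (List (List Char))) (n : Nat),
    (pairsOf s n).map (fun p => p.2) = List.map (fun k : Nat => (k : Int)) (List.range' n s.length) := by
  intro s
  induction s with
  | nil => intro n; simp [pairsOf]
  | cons x xs ih => intro n; simp [pairsOf, List.range'_succ, ih (n + 1)]

theorem rev_items (s : List (List (List Char))) :
    ((pairsOf s 0).foldl (fun acc p => acc.insert p.2 p.1)
        (PySem.Dict.empty : PySem.Dict Int (List (List Char)))).items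
      = (pairsOf s 0).map (fun p => (p.2, p.1)) := by
  rw [PySem.Dict.items_foldl_insert_fresh (pairsOf s 0) (fun p => p.2) (fun p => p.1)
    PySem.Dict.empty (fun a _ => PySem.Dict.contains_empty a.2)
    (by
      rw [snd_pairsOf]
      apply List.Nodup.map (fun a b h => by exact_mod_cast h)
      exact List.nodup_range' 1 (by norm_num))]
  rfl

theorem find_swap : ∀ (s : List (List (List Char))) (n j : Nat), j < s.length →
    List.find? (fun p => p.1 == ((n + j : Nat) : Int))
        ((pairsOf s n).map (fun p => (p.2, p.1)))
      = some (((n + j : Nat) : Int), s.getD j []) := by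
  intro s
  induction s with
  | nil => intro n j h; simp at h
  | cons x xs ih =>
    intro n j h
    simp only [pairsOf, List.map_cons, List.find?_cons]
    cases j with
    | zero =>
      rw [show (((n : Int), x).1 == ((n + 0 : Nat) : Int)) = true from by simp]
      simp
    | succ k =>
      rw [show (((n : Int), x).1 == ((n + (k + 1) : Nat) : Int)) = false from by
        simp; omega]
      have := ih (n + 1) k (by simpa using h)
      rw [show (n + 1 + k : Nat) = (n + (k + 1) : Nat) from by omega] at this
      rw [this]
      simp

theorem rev_get (s : List (List (List Char))) (t : Int) (h0 : 0 ≤ t)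
    (h1 : t.toNat < s.length) :
    ((pairsOf s 0).foldl (fun acc p => acc.insert p.2 p.1)
        (PySem.Dict.empty : PySem.Dict Int (List (List Char)))).get? t
      = some (s.getD t.toNat []) := by
  rw [PySem.Dict.get?, rev_items s]
  have := find_swap s 0 t.toNat h1
  rw [show ((0 + t.toNat : Nat) : Int) = t from by omega] at this
  rw [this]
  rfl
theorem solve_eq (raw_input : String) : solve raw_input = solve_alt raw_input := by
  rw [solve, solve_alt]
  set g0 := (PySem.Str.splitlines raw_input).map String.toList with hg0def
  have hlock := lockstep (pvFuel g0) [] g0 PySem.Dict.empty rfl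
  simp only [List.length_nil, Nat.cast_zero] at hlock
  cases hB : loopB (pvFuel g0) [] g0 with
  | none => rw [hB] at hlock; rw [hlock]; rfl
  | some pr =>
    obtain ⟨s', gf⟩ := pr
    rw [hB] at hlock
    rw [hlock]
    simp only [Option.map_some]
    -- facts about the loop result
    have hfuelpos : pvFuel g0 = (pvFuel g0 - 1) + 1 := by
      have : 0 < pvFuel g0 := by rw [pvFuel]; positivity
      omega
    have hB1 : loopB (pvFuel g0 - 1) [g0] (spinB g0) = some (s', gf) := by
      rw [hfuelpos, loopB] at hB
      simpa using hB
    obtain ⟨hmem, t2, hs2⟩ := loopB_shape _ _ _ _ _ hB1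
    obtain ⟨k, hk⟩ : ∃ k, PySem.List.index? s' gf = some k := by
      cases hidx : PySem.List.index? s' gf with
      | none => exact absurd hmem ((PySem.List.index?_eq_none_iff s' gf).mp hidx)
      | some k => exact ⟨k, rfl⟩
    obtain ⟨hklt, hkeq, -⟩ := PySem.List.getElem_of_index?_eq_some hk
    have hhead : s'.getD 0 [] = g0 := by rw [hs2]; rfl
    have hlenpos : 0 < s'.length := by rw [hs2]; simp
    -- the reversed dict looks up positions in s'
    have hget0 := rev_get s' 0 (by omega) (by simpa using hlenpos)
    -- part b index arithmetic
    have hlam : (0 : Int) < (s'.length : Int) - (k : Int) := by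
      have : (k : Int) < (s'.length : Int) := by exact_mod_cast hklt
      omega
    have hmod0 := PySem.Int.mod_nonneg (1000000000 - (k : Int)) hlam
    have hmodlt := PySem.Int.mod_lt (1000000000 - (k : Int)) hlam
    have htA : iMatchingA 1000000000 (s'.length : Int) ((k : Nat) : Int)
        = (k : Int) + PySem.Int.mod (1000000000 - (k : Int)) ((s'.length : Int) - (k : Int)) := by
      rw [iMatchingA]; ring
    set q := PySem.Int.mod (1000000000 - (k : Int)) ((s'.length : Int) - (k : Int)) with hq
    have htA0 : (0 : Int) ≤ (k : Int) + q := by omega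
    have htAlt : ((k : Int) + q).toNat < s'.length := by omega
    have hgetT := rev_get s' ((k : Int) + q) htA0 htAlt
    -- now compute both components
    rw [hk]
    simp only [Option.getD_some, PySem.List.len_eq, htA, hget0, hgetT, Int.toNat_zero]
    rw [PySem.List.pyGetD_zero, PySem.List.pyGetD_eq_getElem s' [] (by omega) (by omega)]
    rw [hhead]
    rw [show tiltRowB = tiltLeftA from funext tilt_eq]
    congr 1
    · rw [score_eq]
      rfl
    · rw [score_eq]
      congr 1
      rw [List.getD_eq_getElem s' [] (by simpa using htAlt)]

-- ===== VERDICT (by name: the statement is the Claim_ definition above) =====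
theorem solve_spec : Claim_equal_solve := by
  intro raw _
  unfold Spec_solve
  exact solve_eq raw
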